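-- pv_equiv track=rewrite | github.com/lastbyte/dsa-python | problems/medium/maximum_points_you_can_obtain_from_cards.py | maximum_points_util_1
-- ===== SOURCE A (Python) =====
-- def maximum_points_util_1(card_points, k):
--     max_sum = 0
--     sum_from_start = [0]
--     sum_from_end = [0]
--     for i in range(1, k+1):
--         sum_from_start.append(sum_from_start[i-1] + card_points[i-1])
--         sum_from_end.append(sum_from_end[i-1] + card_points[len(card_points)-i])
--     for i in range(k+1):
--         curr_sum = sum_from_end[i] + sum_from_start[k - i]
--         if max_sum < curr_sum :
--             max_sum = curr_sum
--     return max_sum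
-- ===== SOURCE B (Python) =====
-- def maximum_points_util_1(card_points, k):
--     n = len(card_points)
--     total = sum(card_points)
--     win = n - k
--     if win <= 0:
--         return max(0, total)
--     wsum = sum(card_points[:win])
--     mn = wsum
--     for i in range(win, n):
--         wsum += card_points[i] - card_points[i - win]
--         if wsum < mn:
--             mn = wsum
--     return max(0, total - mn)
-- ===== Notes on version B (the rewrite author's own statement) =====
-- stated objective: faster
-- what changed: Replaces the two prefix/suffix sum arrays and the split-enumeration loop by a single O(1)-space sliding window: B computes total - (minimum sum of a contiguous window of n-k cards) with an incrementally updated running sum.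
import Mathlib
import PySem

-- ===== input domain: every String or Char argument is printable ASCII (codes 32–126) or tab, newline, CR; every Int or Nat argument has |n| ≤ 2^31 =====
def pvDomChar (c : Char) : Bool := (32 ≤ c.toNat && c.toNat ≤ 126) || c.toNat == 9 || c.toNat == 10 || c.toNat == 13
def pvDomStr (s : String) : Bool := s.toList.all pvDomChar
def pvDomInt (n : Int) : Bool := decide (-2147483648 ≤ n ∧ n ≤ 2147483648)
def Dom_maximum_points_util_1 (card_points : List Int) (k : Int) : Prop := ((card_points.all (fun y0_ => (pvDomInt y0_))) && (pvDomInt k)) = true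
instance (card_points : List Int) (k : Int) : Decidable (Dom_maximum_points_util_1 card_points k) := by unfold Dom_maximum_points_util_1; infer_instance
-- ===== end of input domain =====

-- B replaces A's two prefix/suffix-sum arrays and split enumeration by a single O(1)-space
-- sliding window (total minus minimum window sum); equivalence proved for k ≤ len(card_points).


-- ===== PORT A =====
-- literal transliteration of A: build sum_from_start / sum_from_end by appending, then scan all splits.
-- indexing is via pyGetD (default 0); Pre_ guarantees every index is in range.
def maximum_points_util_1 (card_points : List Int) (k : Int) : Int :=
  let arrs := (PySem.List.pyRange 1 (k+1) 1).foldl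
    (fun (p : List Int × List Int) i =>
      (p.1 ++ [PySem.List.pyGetD p.1 (i-1) 0 + PySem.List.pyGetD card_points (i-1) 0],
       p.2 ++ [PySem.List.pyGetD p.2 (i-1) 0 +
               PySem.List.pyGetD card_points ((card_points.length : Int) - i) 0]))
    ([0], [0])
  (PySem.List.pyRange 0 (k+1) 1).foldl
    (fun ms i =>
      let curr := PySem.List.pyGetD arrs.2 i 0 + PySem.List.pyGetD arrs.1 (k - i) 0
      if ms < curr then curr else ms) 0

-- ===== PORT B =====
-- literal transliteration of B (Source B): sliding window of size n-k, track minimum window sum.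
def maximum_points_util_1_alt (card_points : List Int) (k : Int) : Int :=
  let n : Int := card_points.length
  let total := card_points.sum
  let win := n - k
  if win ≤ 0 then max 0 total
  else
    let wsum0 := (PySem.List.slice card_points none (some win)).sum
    let r := (PySem.List.pyRange win n 1).foldl
      (fun (p : Int × Int) i =>
        let w := p.1 + PySem.List.pyGetD card_points i 0 - PySem.List.pyGetD card_points (i - win) 0
        (w, if w < p.2 then w else p.2)) (wsum0, wsum0)
    max 0 (total - r.2)

-- ===== PRECONDITION & SPEC =====
-- Pre_ excludes exactly the inputs where A raises IndexError: k > len(card_points).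
def Pre_maximum_points_util_1 (card_points : List Int) (k : Int) : Prop :=
  k ≤ (card_points.length : Int)
instance (card_points : List Int) (k : Int) : Decidable (Pre_maximum_points_util_1 card_points k) := by
  unfold Pre_maximum_points_util_1; infer_instance
def pvWitness_maximum_points_util_1 : List Int × Int := ([5, 1, 3, 2], 2)

def Spec_maximum_points_util_1 (card_points : List Int) (k : Int) (out : Int) : Prop :=
  out = maximum_points_util_1_alt card_points k
instance (card_points : List Int) (k : Int) (out : Int) : Decidable (Spec_maximum_points_util_1 card_points k out) := by
  unfold Spec_maximum_points_util_1; infer_instance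

-- ===== CLAIM (what is proved, stated in full; the proofs are below) =====
def Claim_equal_maximum_points_util_1 : Prop := ∀ (card_points : List Int) (k : Int), Dom_maximum_points_util_1 card_points k → Pre_maximum_points_util_1 card_points k → Spec_maximum_points_util_1 card_points k (maximum_points_util_1 card_points k)

-- ===== LEMMAS AND PROOFS =====

-- prefix sum of the first j cards
def pvPre (xs : List Int) (j : Nat) : Int := (xs.take j).sum
-- suffix sum of the last i cards
def pvSuf (xs : List Int) (i : Nat) : Int := (xs.drop (xs.length - i)).sum
-- sum of the window of length W starting at j
def pvWin (xs : List Int) (W j : Nat) : Int := pvPre xs (j + W) - pvPre xs j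
-- minimum window sum over start positions 0..m
def pvMin (xs : List Int) (W m : Nat) : Int :=
  ((List.range m).map (fun j => pvWin xs W (j+1))).foldl min (pvWin xs W 0)

theorem pvPre_succ (xs : List Int) (j : Nat) (h : j < xs.length) :
    pvPre xs (j+1) = pvPre xs j + xs.getD j 0 := by
  rw [pvPre, pvPre, List.sum_take_succ xs j h]
  simp [List.getD, List.getElem?_eq_getElem h]

theorem pvSuf_succ (xs : List Int) (i : Nat) (h : i < xs.length) :
    pvSuf xs (i+1) = pvSuf xs i + xs.getD (xs.length - (i+1)) 0 := by
  have h1 : xs.length - (i+1) < xs.length := by omega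
  have h2 : xs.length - i = (xs.length - (i+1)) + 1 := by omega
  rw [pvSuf, pvSuf, h2, List.drop_eq_getElem_cons h1, List.sum_cons]
  simp [List.getD, List.getElem?_eq_getElem h1]
  ring


theorem pvIfMax (a b : Int) : (if a < b then b else a) = max a b := by
  rw [max_def]; split_ifs <;> omega

theorem pvIfMin (a b : Int) : (if b < a then b else a) = min a b := by
  rw [min_def]; split_ifs <;> omega

-- A's first loop builds exactly the prefix-sum and suffix-sum tables.
theorem pvArrays (xs : List Int) (m : Nat) (hm : m ≤ xs.length) :
    (PySem.List.pyRange 1 ((m:Int)+1) 1).foldl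
      (fun (p : List Int × List Int) i =>
        (p.1 ++ [PySem.List.pyGetD p.1 (i-1) 0 + PySem.List.pyGetD xs (i-1) 0],
         p.2 ++ [PySem.List.pyGetD p.2 (i-1) 0 +
                 PySem.List.pyGetD xs ((xs.length : Int) - i) 0]))
      ([0], [0])
    = ((List.range (m+1)).map (fun j => pvPre xs j),
       (List.range (m+1)).map (fun j => pvSuf xs j)) := by
  induction m with
  | zero =>
      rw [PySem.List.pyRange_one_eq_nil (by norm_num)]
      simp [pvPre, pvSuf]
  | succ m ih =>
      have hm' : m ≤ xs.length := by omega
      have hcast : ((m+1 : Nat) : Int) + 1 = ((m : Int) + 1) + 1 := by push_cast; ring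
      rw [hcast, PySem.List.pyRange_one_succ_right (by omega), List.foldl_append,
        ih hm']
      have h1 : (m : Int) + 1 - 1 = ((m : Nat) : Int) := by ring
      have h2 : (xs.length : Int) - ((m : Int) + 1) = ((xs.length - (m+1) : Nat) : Int) := by
        omega
      simp only [h1, h2, PySem.List.pyGetD_natCast, List.foldl_cons, List.foldl_nil]
      rw [PySem.List.getD_map_range _ _ _ _ (by omega),
        PySem.List.getD_map_range _ _ _ _ (by omega)]
      rw [List.range_succ (n := m+1)]
      simp only [List.map_append, List.map_singleton,
        pvPre_succ xs m (by omega), pvSuf_succ xs m (by omega)]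

-- running max over splits = max 0 (total - running min of window sums)
theorem pvMaxMin (t : Int) (G : Nat → Int) (K : Nat) (a : Int) :
    (List.range (K+1)).foldl (fun ms i => max ms (t - G (K - i))) a
    = max a (t - ((List.range K).map (fun j => G (j+1))).foldl min (G 0)) := by
  induction K generalizing a with
  | zero => simp [List.range_succ]
  | succ K ih =>
      rw [List.range_succ_eq_map, List.foldl_cons, List.foldl_map]
      simp only [Nat.succ_sub_succ_eq_sub, Nat.sub_zero]
      rw [ih (max a (t - G (K+1)))]
      rw [List.range_succ (n := K), List.map_append, List.map_singleton,
        List.foldl_append, List.foldl_cons, List.foldl_nil]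
      rw [max_assoc, Int.sub_max_sub_left, min_comm]

theorem pvMin_succ (xs : List Int) (W m : Nat) :
    pvMin xs W (m+1) = min (pvMin xs W m) (pvWin xs W (m+1)) := by
  rw [pvMin, pvMin, List.range_succ, List.map_append, List.map_singleton,
    List.foldl_append, List.foldl_cons, List.foldl_nil]

-- suffix + prefix of a split = total - the complementary window sum
theorem pvSplit (xs : List Int) (K W i : Nat) (hKW : K + W = xs.length) (hi : i ≤ K) :
    pvSuf xs i + pvPre xs (K - i) = xs.sum - pvWin xs W (K - i) := by
  have h1 : (xs.take (xs.length - i)).sum + (xs.drop (xs.length - i)).sum = xs.sum :=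
    List.sum_take_add_sum_drop xs _
  have h2 : (K - i) + W = xs.length - i := by omega
  rw [pvWin, h2]
  rw [pvSuf]
  have : pvPre xs (xs.length - i) = (xs.take (xs.length - i)).sum := rfl
  omega

-- B's loop invariant: running window sum and running minimum
theorem pvBfold (xs : List Int) (K W : Nat) (hN : K + W = xs.length) (m : Nat) (hm : m ≤ K) :
    ((List.range m).map (fun (j : Nat) => (W:Int) + (j:Int))).foldl
      (fun (p : Int × Int) i =>
        let w := p.1 + PySem.List.pyGetD xs i 0 - PySem.List.pyGetD xs (i - (W:Int)) 0
        (w, if w < p.2 then w else p.2)) (pvWin xs W 0, pvWin xs W 0)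
    = (pvWin xs W m, pvMin xs W m) := by
  induction m with
  | zero => simp [pvMin]
  | succ m ih =>
      rw [List.range_succ, List.map_append, List.map_singleton, List.foldl_append,
        ih (by omega), List.foldl_cons, List.foldl_nil]
      have h1 : (W:Int) + (m:Int) = ((W + m : Nat) : Int) := by push_cast; ring
      have h2 : ((W + m : Nat) : Int) - (W:Int) = ((m : Nat) : Int) := by push_cast; ring
      simp only [h1, h2, PySem.List.pyGetD_natCast]
      have hw : pvWin xs W m + xs.getD (W + m) 0 - xs.getD m 0 = pvWin xs W (m+1) := by
        have e1 : pvPre xs (m + 1 + W) = pvPre xs (m + W) + xs.getD (m + W) 0 := by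
          have : m + 1 + W = (m + W) + 1 := by omega
          rw [this, pvPre_succ xs (m + W) (by omega)]
        have e2 : pvPre xs (m + 1) = pvPre xs m + xs.getD m 0 := pvPre_succ xs m (by omega)
        have e3 : W + m = m + W := by omega
        rw [pvWin, pvWin, e1, e2, e3]
        ring
      simp only [hw, pvIfMin, pvMin_succ]


theorem pvMin_zero (xs : List Int) (K : Nat) : pvMin xs 0 K = 0 := by
  have hG : ∀ j, pvWin xs 0 j = 0 := by intro j; simp [pvWin]
  rw [pvMin, hG 0]
  rcases PySem.List.foldl_min_mem ((List.range K).map (fun j => pvWin xs 0 (j+1))) 0 with h | h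
  · exact h
  · rcases List.mem_map.mp h with ⟨j, _, hj⟩
    rw [← hj, hG]

-- A, for 0 ≤ k ≤ n, computes max 0 (total - min window sum)
theorem pvA_eq (xs : List Int) (K : Nat) (hK : K ≤ xs.length) :
    maximum_points_util_1 xs (K : Int)
    = max 0 (xs.sum - pvMin xs (xs.length - K) K) := by
  simp only [maximum_points_util_1]
  rw [pvArrays xs K hK]
  have hcast : ((K : Int) + 1) = ((K + 1 : Nat) : Int) := by push_cast; ring
  rw [hcast, PySem.List.pyRange_zero_natCast (K+1)]
  simp only [List.foldl_map]
  have hstep : ∀ i ∈ List.range (K+1), ∀ ms : Int,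
      (fun (ms : Int) (i : Nat) =>
        let curr := PySem.List.pyGetD
            ((List.range (K+1)).map (fun j => pvPre xs j),
             (List.range (K+1)).map (fun j => pvSuf xs j)).2 (i : Int) 0 +
          PySem.List.pyGetD
            ((List.range (K+1)).map (fun j => pvPre xs j),
             (List.range (K+1)).map (fun j => pvSuf xs j)).1 ((K : Int) - (i : Int)) 0
        if ms < curr then curr else ms) ms i
      = max ms (xs.sum - pvWin xs (xs.length - K) (K - i)) := by
    intro i hi ms
    have hi' : i < K + 1 := List.mem_range.mp hi
    have hc : (K : Int) - (i : Int) = ((K - i : Nat) : Int) := by omega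
    simp only [hc, PySem.List.pyGetD_natCast]
    rw [PySem.List.getD_map_range _ _ _ _ (show i < K+1 by omega),
      PySem.List.getD_map_range _ _ _ _ (show K - i < K+1 by omega)]
    rw [pvIfMax, pvSplit xs K (xs.length - K) i (by omega) (by omega)]
  rw [PySem.List.foldl_congr_mem' _ _ _ _ hstep, pvMaxMin xs.sum (pvWin xs (xs.length - K)) K 0]
  rfl

-- B, for 0 ≤ k ≤ n, computes the same
theorem pvB_eq (xs : List Int) (K : Nat) (hK : K ≤ xs.length) :
    maximum_points_util_1_alt xs (K : Int)
    = max 0 (xs.sum - pvMin xs (xs.length - K) K) := by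
  simp only [maximum_points_util_1_alt]
  have hwin : (xs.length : Int) - (K : Int) = ((xs.length - K : Nat) : Int) := by omega
  rw [hwin]
  by_cases hW : xs.length - K = 0
  · rw [if_pos (by omega), hW, pvMin_zero]
    simp
  · rw [if_neg (by omega), PySem.List.slice_to_natCast]
    have hsum0 : (xs.take (xs.length - K)).sum = pvWin xs (xs.length - K) 0 := by
      simp [pvWin, pvPre]
    rw [hsum0, PySem.List.pyRange_one]
    have hlen : ((xs.length : Int) - ((xs.length - K : Nat) : Int)).toNat = K := by omega
    rw [hlen]
    rw [pvBfold xs K (xs.length - K) (by omega) K le_rfl]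

-- ===== VERDICT (by name: the statement is the Claim_ definition above) =====
theorem maximum_points_util_1_spec : Claim_equal_maximum_points_util_1 := by
  intro xs k _ hpre
  unfold Spec_maximum_points_util_1
  simp only [Pre_maximum_points_util_1] at hpre
  rcases lt_or_ge k 0 with hneg | hpos
  · -- negative k: both loops of A are empty and B's window is the whole list
    simp only [maximum_points_util_1, maximum_points_util_1_alt]
    rw [PySem.List.pyRange_one_eq_nil (show k + 1 ≤ 1 by omega),
      PySem.List.pyRange_one_eq_nil (show k + 1 ≤ 0 by omega)]
    rw [if_neg (show ¬ ((xs.length : Int) - k ≤ 0) by omega)]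
    rw [PySem.List.slice_to xs (by omega),
      List.take_of_length_le (show xs.length ≤ ((xs.length : Int) - k).toNat by omega)]
    rw [PySem.List.pyRange_one_eq_nil (show (xs.length : Int) ≤ (xs.length : Int) - k by omega)]
    simp
  · obtain ⟨K, rfl⟩ : ∃ K : Nat, k = (K : Int) := ⟨k.toNat, (Int.toNat_of_nonneg hpos).symm⟩
    have hK : K ≤ xs.length := by omega
    rw [pvA_eq xs K hK, pvB_eq xs K hK]
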